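-- pv_equiv track=rewrite | github.com/xypeng9903/AReaL | tests/torchrun/run_veomini_vs_fsdp_dp_multistep.py | _select_parameter_names
-- ===== SOURCE A (Python) =====
-- def _select_parameter_names(all_names: list[str]) -> list[str]:
--     names = sorted(all_names)
--     selected: list[str] = []
--
--     preferred_suffixes = [
--         "embed_tokens.weight",
--         "layers.0.self_attn.q_proj.weight",
--         "layers.0.self_attn.k_proj.weight",
--         "layers.0.self_attn.v_proj.weight",
--         "layers.0.self_attn.o_proj.weight",
--         "layers.0.mlp.gate_proj.weight",
--         "layers.0.mlp.up_proj.weight",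
--         "layers.0.mlp.down_proj.weight",
--         "norm.weight",
--         "lm_head.weight",
--     ]
--
--     for suffix in preferred_suffixes:
--         for name in names:
--             if name.endswith(suffix) and name not in selected:
--                 selected.append(name)
--                 break
--
--     if not selected:
--         selected = names[:10]
--     return selected
-- ===== SOURCE B (Python) =====
-- def _select_parameter_names(all_names: list[str]) -> list[str]:
--     names = sorted(all_names)
--
--     preferred_suffixes = [
--         "embed_tokens.weight",
--         "layers.0.self_attn.q_proj.weight",
--         "layers.0.self_attn.k_proj.weight",
--         "layers.0.self_attn.v_proj.weight",
--         "layers.0.self_attn.o_proj.weight",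
--         "layers.0.mlp.gate_proj.weight",
--         "layers.0.mlp.up_proj.weight",
--         "layers.0.mlp.down_proj.weight",
--         "norm.weight",
--         "lm_head.weight",
--     ]
--
--     first_match: dict[str, str] = {}
--     for name in names:
--         for suffix in preferred_suffixes:
--             if name.endswith(suffix):
--                 if suffix not in first_match:
--                     first_match[suffix] = name
--                 break
--
--     selected = [first_match[s] for s in preferred_suffixes if s in first_match]
--     if not selected:
--         selected = names[:10]
--     return selected
-- ===== Notes on version B (the rewrite author's own statement) =====
-- stated objective: alternative
-- what changed: Instead of scanning the sorted name list once per preferred suffix (ten scans, with a vestigial 'not in selected' membership check), B makes a single pass over the sorted names building a dict from each suffix to the first name matching it, then reads the dict out in preferred-suffix order; the empty fallback is unchanged.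
import Mathlib
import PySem

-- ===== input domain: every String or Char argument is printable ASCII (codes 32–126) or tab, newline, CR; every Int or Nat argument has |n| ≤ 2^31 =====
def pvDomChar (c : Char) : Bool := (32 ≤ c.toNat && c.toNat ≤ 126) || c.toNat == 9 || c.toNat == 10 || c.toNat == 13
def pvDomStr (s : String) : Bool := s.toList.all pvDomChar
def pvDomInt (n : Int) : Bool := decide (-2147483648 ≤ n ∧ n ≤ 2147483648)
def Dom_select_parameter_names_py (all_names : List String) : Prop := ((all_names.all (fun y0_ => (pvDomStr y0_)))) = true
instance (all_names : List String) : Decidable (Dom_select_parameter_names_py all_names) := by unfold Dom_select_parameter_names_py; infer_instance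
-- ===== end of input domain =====

-- B replaces A's ten scans of the sorted list by one pass building a first-match
-- dict keyed by suffix, read out in preferred-suffix order (objective: alternative).

-- ===== PORT A =====
-- the literal preferred_suffixes list (shared constant of both Pythons)
def pvSufs : List String :=
  [ "embed_tokens.weight",
    "layers.0.self_attn.q_proj.weight",
    "layers.0.self_attn.k_proj.weight",
    "layers.0.self_attn.v_proj.weight",
    "layers.0.self_attn.o_proj.weight",
    "layers.0.mlp.gate_proj.weight",
    "layers.0.mlp.up_proj.weight",
    "layers.0.mlp.down_proj.weight",
    "norm.weight",
    "lm_head.weight" ]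

-- A's inner 'for name in names: if name.endswith(suffix) and name not in selected: append; break'
def pvAInner (names : List String) (selected : List String) (suffix : String) : List String :=
  match names with
  | [] => selected
  | n :: rest =>
    if PySem.Str.endswith n suffix && !(selected.contains n) then selected ++ [n]
    else pvAInner rest selected suffix

def select_parameter_names_py (all_names : List String) : List String :=
  let names := PySem.List.sorted all_names (fun x => x) false
  let selected := pvSufs.foldl (fun sel suffix => pvAInner names sel suffix) []
  if selected.isEmpty then PySem.List.slice names none (some 10) else selected

-- ===== PORT B =====
-- B's inner 'for suffix in preferred_suffixes: if name.endswith(suffix): …; break'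
def pvBInner (sufs : List String) (d : PySem.Dict String String) (n : String) :
    PySem.Dict String String :=
  match sufs with
  | [] => d
  | s :: rest =>
    if PySem.Str.endswith n s then (if d.contains s then d else d.insert s n)
    else pvBInner rest d n

def select_parameter_names_py_alt (all_names : List String) : List String :=
  let names := PySem.List.sorted all_names (fun x => x) false
  let d := names.foldl (fun d n => pvBInner pvSufs d n) PySem.Dict.empty
  let selected := pvSufs.filterMap (fun s => d.get? s)
  if selected.isEmpty then PySem.List.slice names none (some 10) else selected

-- ===== PRECONDITION & SPEC =====
def Spec_select_parameter_names_py (all_names : List String) (out : List String) : Prop := out = select_parameter_names_py_alt all_names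
instance (all_names : List String) (out : List String) : Decidable (Spec_select_parameter_names_py all_names out) := by unfold Spec_select_parameter_names_py; infer_instance

-- ===== CLAIM (what is proved, stated in full; the proofs are below) =====
def Claim_equal_select_parameter_names_py : Prop := ∀ (all_names : List String), Dom_select_parameter_names_py all_names → Spec_select_parameter_names_py all_names (select_parameter_names_py all_names)

-- ===== LEMMAS AND PROOFS =====

-- abbreviation for Python's name.endswith(suffix) in simp-normal form
def pvEw (n s : String) : Bool := PySem.Chars.endswith n.toList s.toList

-- no suffix in the list is a (string) suffix of another distinct one
theorem pvSufs_no_nested :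
    ∀ s1 ∈ pvSufs, ∀ s2 ∈ pvSufs, s1.toList <:+ s2.toList → s1 = s2 := by
  decide

theorem pvSufs_nodup : pvSufs.Nodup := by decide

-- a name ends with at most one suffix from pvSufs
theorem pv_unique_suffix {n s1 s2 : String} (h1 : s1 ∈ pvSufs) (h2 : s2 ∈ pvSufs)
    (e1 : pvEw n s1 = true) (e2 : pvEw n s2 = true) :
    s1 = s2 := by
  unfold pvEw at e1 e2
  rw [PySem.Chars.endswith_iff] at e1 e2
  rcases List.suffix_or_suffix_of_suffix e1 e2 with h | h
  · exact pvSufs_no_nested s1 h1 s2 h2 h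
  · exact (pvSufs_no_nested s2 h2 s1 h1 h).symm

-- A's inner scan, when no selected element ends with the suffix, is find?
theorem pvAInner_eq_find (names sel : List String) (s : String)
    (h : ∀ n ∈ sel, pvEw n s = false) :
    pvAInner names sel s =
      match names.find? (fun n => pvEw n s) with
      | some n => sel ++ [n]
      | none => sel := by
  induction names with
  | nil => rfl
  | cons n rest ih =>
    cases he : pvEw n s with
    | true =>
      have hn : n ∉ sel := by
        intro hmem
        rw [h n hmem] at he
        cases he
      simp [pvAInner, List.find?, pvEw] at *
      simp [he, hn]
    | false =>
      simp [pvAInner, List.find?, pvEw] at *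
      simp [he, ih]

-- A's outer loop over a nodup sublist of pvSufs equals the filterMap spine
theorem pvAFold_eq_spine (names : List String) :
    ∀ (sufs : List String), (∀ s ∈ sufs, s ∈ pvSufs) → sufs.Nodup →
    ∀ (sel : List String),
      (∀ n ∈ sel, ∀ s ∈ sufs, pvEw n s = false) →
      sufs.foldl (fun sel suffix => pvAInner names sel suffix) sel =
        sel ++ sufs.filterMap (fun s => names.find? (fun n => pvEw n s)) := by
  intro sufs
  induction sufs with
  | nil => intro _ _ sel _; simp
  | cons s rest ih =>
    intro hmem hnd sel hsel
    have hs : s ∈ pvSufs := hmem s (by simp)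
    have hstep := pvAInner_eq_find names sel s (fun n hn => hsel n hn s (by simp))
    cases hfind : names.find? (fun n => pvEw n s) with
    | none =>
      rw [List.foldl_cons, hstep, hfind]
      rw [ih (fun t ht => hmem t (by simp [ht])) hnd.of_cons sel
            (fun n hn t ht => hsel n hn t (by simp [ht]))]
      rw [List.filterMap_cons, hfind]
    | some m =>
      have hm : pvEw m s = true := by
        simpa using List.find?_some hfind
      rw [List.foldl_cons, hstep, hfind]
      have hsel' : ∀ n ∈ sel ++ [m], ∀ t ∈ rest, pvEw n t = false := by
        intro n hn t ht
        rcases List.mem_append.mp hn with hn | hn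
        · exact hsel n hn t (by simp [ht])
        · have hnm : n = m := by simpa using hn
          subst hnm
          cases hc : pvEw n t with
          | false => rfl
          | true =>
            have : t = s := pv_unique_suffix (hmem t (by simp [ht])) hs hc hm
            subst this
            exact absurd ht (List.nodup_cons.mp hnd).1
      rw [ih (fun t ht => hmem t (by simp [ht])) hnd.of_cons (sel ++ [m]) hsel']
      rw [List.filterMap_cons, hfind]
      simp

-- the first suffix a name matches (Source B's inner break)
def pvMatchSuf (n : String) : Option String :=
  pvSufs.find? (fun s => pvEw n s)

theorem pvBInner_eq_match (d : PySem.Dict String String) (n : String) :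
    ∀ sufs, pvBInner sufs d n =
      match sufs.find? (fun s => pvEw n s) with
      | some s => if d.contains s then d else d.insert s n
      | none => d := by
  intro sufs
  induction sufs with
  | nil => rfl
  | cons s rest ih =>
    cases he : pvEw n s with
    | true =>
      simp only [pvBInner, List.find?]
      have he' : PySem.Str.endswith n s = true := by simpa [pvEw] using he
      rw [he', he]
      rfl
    | false =>
      simp only [pvBInner, List.find?]
      have he' : PySem.Str.endswith n s = false := by simpa [pvEw] using he
      rw [he', he]
      simpa using ih

-- dict contains ↔ get? is some, in the two directions used below
theorem pv_get?_of_contains_false {d : PySem.Dict String String} {k : String}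
    (hc : d.contains k = false) : d.get? k = none := by
  have h := PySem.Dict.contains_eq_isSome_get? (d := d) (k := k)
  rw [hc] at h
  cases hg : d.get? k with
  | none => rfl
  | some v => rw [hg] at h; simp at h

-- the dict built by B's fold looks up to the first name whose first match is s
theorem pvBFold_get (s : String) :
    ∀ (names : List String) (d0 : PySem.Dict String String),
      ((names.foldl (fun d n => pvBInner pvSufs d n) d0).get? s) =
        (match d0.get? s with
         | some v => some v
         | none => names.find? (fun n => pvMatchSuf n == some s)) := by
  intro names
  induction names with
  | nil => intro d0; cases hg : d0.get? s <;> simp [hg]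
  | cons n rest ih =>
    intro d0
    rw [List.foldl_cons, pvBInner_eq_match]
    show (rest.foldl _ (match pvMatchSuf n with
         | some t => if d0.contains t then d0 else d0.insert t n
         | none => d0)).get? s = _
    cases hms : pvMatchSuf n with
    | none =>
      rw [ih d0]
      cases hg : d0.get? s <;> simp [List.find?, hms]
    | some t =>
      by_cases hts : t = s
      · subst hts
        cases hc : d0.contains t with
        | true =>
          have hsome : (d0.get? t).isSome := by
            rw [← PySem.Dict.contains_eq_isSome_get?]; exact hc
          obtain ⟨v, hv⟩ := Option.isSome_iff_exists.mp hsome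
          simp only [hc, if_true]
          rw [ih d0, hv]
        | false =>
          have hnone : d0.get? t = none := pv_get?_of_contains_false hc
          simp only [hc, Bool.false_eq_true, if_false]
          rw [ih (d0.insert t n), PySem.Dict.get?_insert_self, hnone]
          simp [List.find?, hms]
      · have hbe : (t == s) = false := by simp [hts]
        cases hc : d0.contains t with
        | true =>
          simp only [hc, if_true]
          rw [ih d0]
          cases hg : d0.get? s <;> simp [List.find?, hms, hbe]
        | false =>
          simp only [hc, Bool.false_eq_true, if_false]
          rw [ih (d0.insert t n), PySem.Dict.get?_insert_of_ne d0 n (fun h => hts h.symm)]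
          cases hg : d0.get? s <;> simp [List.find?, hms, hbe]

-- for s ∈ pvSufs, 'first match is s' is just 'ends with s'
theorem pvMatchSuf_pred (s : String) (hs : s ∈ pvSufs) (n : String) :
    (pvMatchSuf n == some s) = pvEw n s := by
  cases hm : pvMatchSuf n with
  | none =>
    have hes : pvEw n s = false := by
      cases hc : pvEw n s with
      | false => rfl
      | true =>
        exact absurd hc (by
          simpa using (List.find?_eq_none.mp hm s hs))
    simp [hes]
  | some t =>
    have ht1 : t ∈ pvSufs := List.mem_of_find?_eq_some hm
    have ht2 : pvEw n t = true := by simpa using List.find?_some hm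
    by_cases hts : t = s
    · subst hts; simp [ht2]
    · have hes : pvEw n s = false := by
        cases hc : pvEw n s with
        | false => rfl
        | true => exact absurd (pv_unique_suffix ht1 hs ht2 hc) hts
      simp [hes, hts]

theorem pv_find_congr {α : Type} (p q : α → Bool) :
    ∀ (l : List α), (∀ x ∈ l, p x = q x) → l.find? p = l.find? q := by
  intro l
  induction l with
  | nil => intro _; rfl
  | cons x rest ih =>
    intro h
    have hx := h x (by simp)
    cases hp : p x with
    | true => simp [List.find?, hp, hx ▸ hp]
    | false =>
      have hq : q x = false := hx ▸ hp
      simp [List.find?, hp, hq, ih (fun y hy => h y (by simp [hy]))]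

-- ===== VERDICT (by name: the statement is the Claim_ definition above) =====
theorem select_parameter_names_py_spec : Claim_equal_select_parameter_names_py := by
  intro all_names _
  unfold Spec_select_parameter_names_py select_parameter_names_py select_parameter_names_py_alt
  simp only []
  set names := PySem.List.sorted all_names (fun x => x) false
  have hA := pvAFold_eq_spine names pvSufs (fun s hs => hs) pvSufs_nodup []
    (by intro n hn; simp at hn)
  have hB : pvSufs.filterMap
      (fun s => (names.foldl (fun d n => pvBInner pvSufs d n) PySem.Dict.empty).get? s) =
      pvSufs.filterMap (fun s => names.find? (fun n => pvEw n s)) := by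
    apply List.filterMap_congr
    intro s hs
    rw [pvBFold_get s names PySem.Dict.empty]
    simp only [PySem.Dict.get?_empty]
    exact pv_find_congr _ _ names (fun n _ => pvMatchSuf_pred s hs n)
  rw [hA, hB]
  simp
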